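-- pv_equiv track=rewrite | github.com/anysaaa/Geek2024 | Geek-python/android.py | int_array_to_hex8_array
-- ===== SOURCE A (Python) =====
-- def int_array_to_hex8_array(int_array):
--     # 将每个32位整数转换成8位的十六进制字符串
--     hex8_array = []
--     for value in int_array:
--         # 确保值为非负数
--         value &= 0xFFFFFFFF
--         # 将32位整数转换为4个字节的字节对象（使用小端序）
--         bytes_obj = value.to_bytes(4, byteorder='little')
--         # 将每个字节转换为2位的十六进制字符串
--         for i in range(4):
--             hex8_array.append(bytes_obj[i].to_bytes(1, byteorder='big').hex())
--
--     return hex8_array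
-- ===== SOURCE B (Python) =====
-- def int_array_to_hex8_array(int_array):
--     out = []
--     for value in int_array:
--         s = format(value & 0xFFFFFFFF, '08x')
--         out += [s[6:8], s[4:6], s[2:4], s[0:2]]
--     return out
-- ===== Notes on version B (the rewrite author's own statement) =====
-- stated objective: idiomatic
-- what changed: B drops the to_bytes(4,'little') byte object and the inner per-byte to_bytes(1).hex() loop, instead formatting the masked value once as an 8-char '08x' string and appending its four byte pairs via fixed reversed slices.
import Mathlib
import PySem

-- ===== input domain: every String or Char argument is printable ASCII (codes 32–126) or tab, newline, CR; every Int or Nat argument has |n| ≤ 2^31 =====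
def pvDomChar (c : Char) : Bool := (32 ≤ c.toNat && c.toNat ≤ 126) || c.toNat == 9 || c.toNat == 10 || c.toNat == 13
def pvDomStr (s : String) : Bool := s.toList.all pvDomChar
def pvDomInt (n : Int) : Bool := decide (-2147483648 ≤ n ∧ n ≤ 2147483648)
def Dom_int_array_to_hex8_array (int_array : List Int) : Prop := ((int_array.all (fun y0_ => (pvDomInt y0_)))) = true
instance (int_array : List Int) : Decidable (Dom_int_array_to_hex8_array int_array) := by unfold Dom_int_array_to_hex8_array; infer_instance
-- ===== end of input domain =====

-- B replaces A's to_bytes(4,'little') plus per-byte to_bytes(1).hex() inner loop by one 8-char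
-- '08x' format of the masked value and four fixed reversed-pair slices (idiomatic decomposition).

-- ===== PORT A =====
-- lowercase hex digit of a nibble 0..15 (shared table for both ports)
def pvHexDigit (n : Int) : Char :=
  ['0','1','2','3','4','5','6','7','8','9','a','b','c','d','e','f'].getD n.toNat '0'

-- b.to_bytes(1, byteorder='big').hex() — exact for 0 ≤ b < 256, the only values A feeds it
def pvByteHex (b : Int) : String :=
  String.ofList [pvHexDigit (PySem.Int.floordiv b 16), pvHexDigit (PySem.Int.mod b 16)]

-- A's loop body: mask, split into 4 little-endian bytes (value.to_bytes(4,'little') ported as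
-- floordiv/mod by 256 powers, exact since 0 ≤ masked value < 2^32), append each byte's hex pair
def pvStepA (hex8_array : List String) (value : Int) : List String :=
  let v := PySem.Int.band value 4294967295
  let bytes_obj : List Int :=
    [PySem.Int.mod v 256, PySem.Int.mod (PySem.Int.floordiv v 256) 256,
     PySem.Int.mod (PySem.Int.floordiv v 65536) 256, PySem.Int.mod (PySem.Int.floordiv v 16777216) 256]
  bytes_obj.foldl (fun acc b => acc ++ [pvByteHex b]) hex8_array

def int_array_to_hex8_array (int_array : List Int) : List String :=
  int_array.foldl pvStepA []

-- ===== PORT B =====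
-- format(v, '08x') — big-endian 8 hex chars; exact for 0 ≤ v < 2^32, the only values B feeds it
def pvHex8 (v : Int) : String :=
  String.ofList ((List.range 8).map (fun i => pvHexDigit (PySem.Int.mod (PySem.Int.floordiv v (16 ^ (7 - i))) 16)))

-- B's loop body: one formatted string, four reversed-pair slices
def pvStepB (out : List String) (value : Int) : List String :=
  let s := pvHex8 (PySem.Int.band value 4294967295)
  out ++ [PySem.Str.slice s (some 6) (some 8), PySem.Str.slice s (some 4) (some 6),
          PySem.Str.slice s (some 2) (some 4), PySem.Str.slice s (some 0) (some 2)]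

def int_array_to_hex8_array_alt (int_array : List Int) : List String :=
  int_array.foldl pvStepB []

-- ===== PRECONDITION & SPEC =====
def Spec_int_array_to_hex8_array (int_array : List Int) (out : List String) : Prop := out = int_array_to_hex8_array_alt int_array
instance (int_array : List Int) (out : List String) : Decidable (Spec_int_array_to_hex8_array int_array out) := by unfold Spec_int_array_to_hex8_array; infer_instance

-- ===== CLAIM (what is proved, stated in full; the proofs are below) =====
def Claim_equal_int_array_to_hex8_array : Prop := ∀ (int_array : List Int), Dom_int_array_to_hex8_array int_array → Spec_int_array_to_hex8_array int_array (int_array_to_hex8_array int_array)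

-- ===== LEMMAS AND PROOFS =====
-- per-value agreement: A's four byte-hex strings are exactly B's four slices
theorem pvStep_eq (acc : List String) (value : Int) : pvStepA acc value = pvStepB acc value := by
  simp [pvStepA, pvStepB, pvHex8, pvByteHex, List.range, List.range.loop,
        PySem.Str.slice, PySem.Chars.slice, PySem.List.slice, PySem.List.clampIdx]
  generalize PySem.Int.band value 4294967295 = w
  refine ⟨?_, ?_, ?_, ?_⟩ <;> congr 3 <;> first | rfl | omega

-- ===== VERDICT (by name: the statement is the Claim_ definition above) =====
theorem int_array_to_hex8_array_spec : Claim_equal_int_array_to_hex8_array := by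
  intro int_array _
  unfold Spec_int_array_to_hex8_array int_array_to_hex8_array int_array_to_hex8_array_alt
  rw [funext (fun acc => funext (pvStep_eq acc))]
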